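-- pv_equiv track=rewrite | github.com/kbaikov/adventofcode2017 | advent2017_14.py | part1
-- ===== SOURCE A (Python) =====
-- from itertools import cycle, dropwhile, permutations, accumulate
-- import operator
--
-- def insert_from(place, from_l, to_l):
--     for i, item in enumerate(from_l):
--         try:
--             to_l[i + place] = item
--         except IndexError:
--             to_l[i + place - len(to_l)] = item
--     return to_l
--
-- def select_reverse(place, length, to_l):
--     if place + length < len(to_l):
--         return list(reversed(to_l[place:place + length]))
--     else:
--         p = length - len(to_l[place:])
--         return list(reversed(to_l[place:] + to_l[:p]))
--
-- def one_round(length_sequence, current_position, skip_size, init_list):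
--     for length in length_sequence:
--         result_list = insert_from(
--             current_position,
--             select_reverse(
--                 current_position,
--                 length,
--                 init_list),
--             init_list)
--         current_position += length + skip_size
--         if current_position >= len(result_list):
--             current_position = current_position % len(result_list)
--         skip_size += 1
--         if skip_size >= len(result_list):
--             skip_size = skip_size % len(result_list)
--     return result_list, current_position, skip_size
--
-- def knot_hash(input_string):
--     mega_list = list(range(256))
--     current_position = 0
--     skip_size = 0
--     lengths = [ord(i) for i in input_string]
--     lengths.extend([17, 31, 73, 47, 23])
--     for i in range(64):
--         mega_list, current_position, skip_size = one_round(
--             lengths, current_position, skip_size, mega_list)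
--     chunks = [mega_list[x:x + 16] for x in range(0, len(mega_list), 16)]
--     dense_hash = [list(accumulate(chunk, func=operator.xor))[-1]
--                   for chunk in chunks]
--     hash_string = "".join([format(x, '02x') for x in dense_hash])
--     return hash_string
--
-- def to_bin(s):
--     return bin(int(s, base=16))[2:].zfill(4)
--
-- def part1(s):
--     input_rows = [s + '-' + '{}'.format(n) for n in range(128)]
--     input_rows_hashes = [knot_hash(i) for i in input_rows]
--     input_rows_bin = [''.join(map(to_bin, digits))
--                       for digits in input_rows_hashes]
--     total_sum = 0
--     for row in input_rows_bin:
--         total_sum += row.count('1')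
--     return total_sum
-- ===== SOURCE B (Python) =====
-- def _popcounts():
--     # popcount table built by dynamic programming: pc[i] = pc[i >> 1] + (i & 1)
--     pc = [0] * 256
--     for i in range(1, 256):
--         pc[i] = pc[i >> 1] + (i & 1)
--     return pc
--
--
-- _PC = _popcounts()
--
--
-- def _twists(lengths):
--     # the reversal lengths and rotations are independent of the list contents:
--     # precompute, for every reversal of all 64 rounds, (segment length, rotation after it)
--     out = []
--     skip = 0
--     for _ in range(64):
--         for n in lengths:
--             out.append((n, (n + skip) % 256))
--             skip = (skip + 1) % 256
--     return out
--
--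
-- def _sparse(lengths):
--     # keep the ring in a rotated frame where the current position is always index 0:
--     # each twist reverses a plain prefix and rotates left; un-rotate once at the end
--     l = list(range(256))
--     offset = 0
--     for n, shift in _twists(lengths):
--         l = l[:n][::-1] + l[n:]
--         l = l[shift:] + l[:shift]
--         offset = (offset + shift) % 256
--     r = (256 - offset) % 256
--     return l[r:] + l[:r]
--
--
-- def part1(s):
--     total = 0
--     for row in range(128):
--         l = _sparse([ord(c) for c in s + '-' + str(row)] + [17, 31, 73, 47, 23])
--         for x in range(0, 256, 16):
--             b = 0
--             for v in l[x:x + 16]: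
--                 b ^= v
--             total += _PC[b]
--     return total
-- ===== Notes on version B (the rewrite author's own statement) =====
-- stated objective: faster
-- what changed: B first precomputes the whole 64-round reversal schedule in a pure arithmetic pass (exploiting that segment positions are data-independent), then runs the knot state in a rotated frame where the current position is always index 0 -- each step is a plain prefix reversal plus one left rotation with a single un-rotation at the very end -- replacing A's wraparound slice extraction written back element-by-element through an IndexError-catching helper, and counts set bits of the xor-folded dense bytes with a DP-built popcount table instead of A's accumulate()[-1] / hex-string / per-nibble …
import Mathlib
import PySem

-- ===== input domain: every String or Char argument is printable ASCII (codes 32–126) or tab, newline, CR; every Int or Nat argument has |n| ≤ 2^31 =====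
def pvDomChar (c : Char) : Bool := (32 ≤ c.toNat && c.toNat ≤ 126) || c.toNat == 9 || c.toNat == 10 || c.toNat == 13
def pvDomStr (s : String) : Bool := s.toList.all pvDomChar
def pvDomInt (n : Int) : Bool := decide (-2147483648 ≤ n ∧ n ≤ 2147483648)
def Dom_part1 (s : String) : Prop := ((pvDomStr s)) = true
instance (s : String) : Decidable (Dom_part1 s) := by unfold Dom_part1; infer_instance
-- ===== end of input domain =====

set_option maxRecDepth 100000

-- B precomputes the data-independent reversal schedule in a separate arithmetic pass, runs the knot
-- state in a rotated frame (plain prefix reversal + one left rotation per step, a single un-rotation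
-- at the end) instead of A's wraparound slice + IndexError-catching write-back helper, and counts set
-- bits with a DP popcount table instead of A's hex/binary-string pipeline (objective: faster,
-- measured constant-factor; return value only, no argument is mutated).

-- ===== PORT A =====
-- All list values and positions in the knot hash are nonnegative Python ints (list(range(256)),
-- ord() values, nonnegative arithmetic), so they are carried as Nat; every index below is nonneg.

-- insert_from: 'to_l[i+place] = item' with the IndexError fallback 'to_l[i+place-len] = item'
-- (a second IndexError would propagate in Python; unreachable from part1 — List.set is a no-op there)
def insertFromGo (place : Nat) (i : Nat) (from_l : List Nat) (to_l : List Nat) : List Nat :=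
  match from_l with
  | [] => to_l
  | item :: rest =>
      let to_l' := if i + place < to_l.length then to_l.set (i + place) item
                   else to_l.set (i + place - to_l.length) item
      insertFromGo place (i + 1) rest to_l'

def insertFrom (place : Nat) (from_l to_l : List Nat) : List Nat :=
  insertFromGo place 0 from_l to_l

-- select_reverse (slices with nonnegative bounds are the clamped drop/take, exactly as Python)
def selectReverse (place length : Nat) (to_l : List Nat) : List Nat :=
  if place + length < to_l.length then
    ((to_l.drop place).take length).reverse
  else
    let p := length - (to_l.drop place).length
    ((to_l.drop place) ++ to_l.take p).reverse

-- one_round (returns init_list unchanged on an empty length list; Python would NameError there,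
-- unreachable from part1 where the lengths list always has ≥ 5 elements)
def oneRoundGo : List Nat → Nat → Nat → List Nat → (List Nat × Nat × Nat)
  | [], pos, skip, l => (l, pos, skip)
  | length :: rest, pos, skip, l =>
      let result := insertFrom pos (selectReverse pos length l) l
      let pos1 := pos + length + skip
      let pos2 := if result.length ≤ pos1 then pos1 % result.length else pos1
      let skip1 := skip + 1
      let skip2 := if result.length ≤ skip1 then skip1 % result.length else skip1
      oneRoundGo rest pos2 skip2 result

-- for i in range(64): one_round(...)
def roundsA (lengths : List Nat) : Nat → (List Nat × Nat × Nat) → (List Nat × Nat × Nat)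
  | 0, st => st
  | k + 1, st => roundsA lengths k (oneRoundGo lengths st.2.1 st.2.2 st.1)

-- chunks: [mega_list[x:x+16] for x in range(0, len(mega_list), 16)]
def chunksGo (l : List Nat) (x : Nat) : List (List Nat) :=
  if _h : x < l.length then ((l.drop x).take 16) :: chunksGo l (x + 16)
  else []
termination_by l.length - x
decreasing_by omega

-- itertools.accumulate(chunk, func=operator.xor)
def accXorGo (acc : Nat) : List Nat → List Nat
  | [] => []
  | x :: rest => (acc ^^^ x) :: accXorGo (acc ^^^ x) rest

def accumulateXor : List Nat → List Nat
  | [] => []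
  | a :: rest => a :: accXorGo a rest

-- format(x, '02x'): lowercase hex digits of x, zero-padded to width 2
def hexChar (d : Nat) : Char := if d < 10 then Char.ofNat (48 + d) else Char.ofNat (87 + d)

-- hex digits of x (empty for 0); structural recursion on a fuel bound (x/16 < x, so fuel x suffices)
def hexDigitsGo : Nat → Nat → List Char
  | 0, _ => []
  | fuel + 1, x => if x = 0 then [] else hexDigitsGo fuel (x / 16) ++ [hexChar (x % 16)]

def hexDigits (x : Nat) : List Char := hexDigitsGo x x

def format02x (x : Nat) : List Char :=
  PySem.Chars.zfill (if x = 0 then ['0'] else hexDigits x) 2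

-- knot_hash, as the list of characters of the returned hex string
def knotHashA (input_string : String) : List Char :=
  let lengths := input_string.toList.map Char.toNat ++ [17, 31, 73, 47, 23]
  let st := roundsA lengths 64 (List.range 256, 0, 0)
  let chunks := chunksGo st.1 0
  -- list(accumulate(chunk, xor))[-1]; the [-1] raises on an empty chunk, unreachable here
  -- (every chunk of the 256-element list is nonempty), so the total getLastD 0 is exact
  let dense := chunks.map (fun chunk => (accumulateXor chunk).getLastD 0)
  PySem.Chars.join [] (dense.map format02x)

-- to_bin: bin(int(s, base=16))[2:].zfill(4) for a one-hex-digit string s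
-- (the ValueError of int(s,16) is unreachable — hash characters are hex digits — so getD 0 is exact)
def toBinA (c : Char) : List Char :=
  let v := (PySem.Int.ofCharsBase? [c] 16).getD 0
  PySem.Chars.zfill (PySem.Chars.slice (PySem.Int.toBinChars0b v) (some 2) none) 4

def part1 (s : String) : Int :=
  let input_rows := (List.range 128).map (fun n => s ++ "-" ++ PySem.Int.toStr (n : Int))
  let input_rows_hashes := input_rows.map (fun i => knotHashA i)
  let input_rows_bin := input_rows_hashes.map (fun digits => PySem.Chars.join [] (digits.map toBinA))
  input_rows_bin.foldl (fun total_sum row => total_sum + (PySem.Chars.count row ['1'] : Int)) 0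

-- ===== PORT B =====
-- _popcounts: pc[i] = pc[i >> 1] + (i & 1) over a preallocated 256-element table
def popcountsB : List Nat :=
  (List.range' 1 255).foldl
    (fun pc i => pc.set i (pc.getD (i >>> 1) 0 + (i &&& 1)))
    (List.replicate 256 0)

-- _twists: the pure arithmetic pass appending (n, (n+skip)%256) for every reversal of all 64 rounds
def twistsInner : List Nat → Nat → List (Nat × Nat) → (List (Nat × Nat) × Nat)
  | [], skip, out => (out, skip)
  | n :: rest, skip, out => twistsInner rest ((skip + 1) % 256) (out ++ [(n, (n + skip) % 256)])

def twistsRounds (lengths : List Nat) : Nat → Nat → List (Nat × Nat) → List (Nat × Nat)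
  | 0, _, out => out
  | k + 1, skip, out =>
      let p := twistsInner lengths skip out
      twistsRounds lengths k p.2 p.1

def twistsB (lengths : List Nat) : List (Nat × Nat) := twistsRounds lengths 64 0 []

-- _sparse: prefix reversal + left rotation per twist, offset tracked, one un-rotation at the end
def sparseGo : List (Nat × Nat) → List Nat → Nat → (List Nat × Nat)
  | [], l, off => (l, off)
  | (n, shift) :: rest, l, off =>
      let l1 := (l.take n).reverse ++ l.drop n
      let l2 := l1.drop shift ++ l1.take shift
      sparseGo rest l2 ((off + shift) % 256)

def sparseB (lengths : List Nat) : List Nat :=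
  let p := sparseGo (twistsB lengths) (List.range 256) 0
  let r := (256 - p.2) % 256
  p.1.drop r ++ p.1.take r

-- for x in range(0, 256, 16): b = xor of l[x:x+16]; total += _PC[b]
-- (_PC[b] cannot raise: b < 256; the getD is exact there)
def bRowCountGo (l : List Nat) (x : Nat) (total : Int) : Int :=
  if _h : x < 256 then
    let b : Nat := ((l.drop x).take 16).foldl (fun a v => a ^^^ v) 0
    bRowCountGo l (x + 16) (total + (popcountsB.getD b 0 : Int))
  else total
termination_by 256 - x
decreasing_by omega

def part1_alt (s : String) : Int :=
  (List.range 128).foldl (fun total row =>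
    bRowCountGo (sparseB ((s ++ "-" ++ PySem.Int.toStr (row : Int)).toList.map Char.toNat
      ++ [17, 31, 73, 47, 23])) 0 total) 0

-- ===== PRECONDITION & SPEC =====
def Spec_part1 (s : String) (out : Int) : Prop := out = part1_alt s
instance (s : String) (out : Int) : Decidable (Spec_part1 s out) := by unfold Spec_part1; infer_instance

-- ===== CLAIM (what is proved, stated in full; the proofs are below) =====
def Claim_equal_part1 : Prop := ∀ (s : String), Dom_part1 s → Spec_part1 s (part1 s)

-- ===== LEMMAS AND PROOFS =====

-- Proof-only intermediate: A's in-place step as one circular reversal (rotate, reverse prefix,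
-- rotate back), with the position/skip arithmetic already reduced mod 256.
def reverseWrap (l : List Nat) (pos n : Nat) : List Nat :=
  let r := l.drop pos ++ l.take pos
  let r2 := (r.take n).reverse ++ r.drop n
  let k := l.length - pos
  r2.drop k ++ r2.take k

def fwdRoundGo : List Nat → Nat → Nat → List Nat → (List Nat × Nat × Nat)
  | [], pos, skip, l => (l, pos, skip)
  | n :: rest, pos, skip, l =>
      fwdRoundGo rest ((pos + n + skip) % 256) ((skip + 1) % 256) (reverseWrap l pos n)

def fwdIter (lengths : List Nat) : Nat → (List Nat × Nat × Nat) → (List Nat × Nat × Nat)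
  | 0, st => st
  | k + 1, st => fwdIter lengths k (fwdRoundGo lengths st.2.1 st.2.2 st.1)

theorem iF_append (p : Nat) : ∀ (ys1 ys2 : List Nat) (i : Nat) (l : List Nat),
    insertFromGo p i (ys1 ++ ys2) l = insertFromGo p (i + ys1.length) ys2 (insertFromGo p i ys1 l) := by
  intro ys1
  induction ys1 with
  | nil => intro ys2 i l; simp [insertFromGo]
  | cons y t ih =>
    intro ys2 i l
    simp only [List.cons_append, insertFromGo, ih, List.length_cons]
    ring_nf

theorem take_set_succ (l : List Nat) (j : Nat) (x : Nat) (h : j < l.length) :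
    (l.set j x).take (j + 1) = l.take j ++ [x] := by
  rw [List.set_eq_take_append_cons_drop, if_pos h, List.take_append]
  simp [List.take_take, List.length_take, Nat.le_of_lt h]

theorem iF_contig : ∀ (ys : List Nat) (i p : Nat) (l : List Nat),
    i + p + ys.length ≤ l.length →
    insertFromGo p i ys l = l.take (i + p) ++ ys ++ l.drop (i + p + ys.length) := by
  intro ys
  induction ys with
  | nil => intro i p l h; simp [insertFromGo]
  | cons y t ih =>
    intro i p l h
    simp only [List.length_cons] at h
    have hj : i + p < l.length := by omega
    simp only [insertFromGo, if_pos hj]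
    rw [ih (i+1) p (l.set (i+p) y) (by simp; omega)]
    simp only [show i + 1 + p = (i + p) + 1 by omega]
    rw [take_set_succ l (i+p) y hj, List.drop_set_of_lt (by omega)]
    simp [show i + p + (t.length + 1) = i + p + 1 + t.length by omega]

theorem iF_wrap : ∀ (ys : List Nat) (i p : Nat) (l : List Nat),
    l.length ≤ i + p → (i + p - l.length) + ys.length ≤ l.length →
    insertFromGo p i ys l = l.take (i + p - l.length) ++ ys ++ l.drop (i + p - l.length + ys.length) := by
  intro ys
  induction ys with
  | nil => intro i p l h1 h2; simp [insertFromGo]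
  | cons y t ih =>
    intro i p l h1 h2
    simp only [List.length_cons] at h2
    have hj : i + p - l.length < l.length := by omega
    simp only [insertFromGo, if_neg (by omega : ¬ i + p < l.length)]
    rw [ih (i+1) p (l.set (i + p - l.length) y) (by simp; omega) (by simp; omega)]
    simp only [List.length_set, show i + 1 + p - l.length = (i + p - l.length) + 1 by omega]
    rw [take_set_succ l (i + p - l.length) y hj, List.drop_set_of_lt (by omega)]
    simp [show i + p - l.length + (t.length + 1) = i + p - l.length + 1 + t.length by omega]

theorem selectReverse_eq (p n : Nat) (l : List Nat) (hp : p < l.length) (hn : n ≤ l.length) :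
    selectReverse p n l = ((l.drop p ++ l.take p).take n).reverse := by
  unfold selectReverse
  by_cases h : p + n < l.length
  · rw [if_pos h]
    congr 1
    rw [List.take_append]
    simp [show n - (l.length - p) = 0 by omega]
  · rw [if_neg h]
    rw [List.take_append, List.take_of_length_le (by simp; omega), List.take_take]
    simp [show n - (l.length - p) ≤ p by omega]

theorem reverseWrap_def (l : List Nat) (pos n : Nat) :
    reverseWrap l pos n =
      (((l.drop pos ++ l.take pos).take n).reverse ++ (l.drop pos ++ l.take pos).drop n).drop (l.length - pos)
      ++ (((l.drop pos ++ l.take pos).take n).reverse ++ (l.drop pos ++ l.take pos).drop n).take (l.length - pos) := rfl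

theorem step_eq (l : List Nat) (pos n : Nat) (hp : pos < l.length) (hn : n ≤ l.length) :
    insertFrom pos (selectReverse pos n l) l = reverseWrap l pos n := by
  have hdl : (l.drop pos).length = l.length - pos := by simp
  have htl : (l.take pos).length = pos := by simp; omega
  rw [selectReverse_eq pos n l hp hn, insertFrom, reverseWrap_def]
  set r := l.drop pos ++ l.take pos with hr
  have hrlen : r.length = l.length := by rw [hr]; simp; omega
  set ys := (r.take n).reverse with hy
  have hyslen : ys.length = n := by rw [hy]; simp [hrlen]; omega
  set k := l.length - pos with hk
  by_cases hc : n ≤ k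
  -- contiguous case: the reversed segment fits before the end of the list
  · have hb : r.drop n = l.drop (pos + n) ++ l.take pos := by
      rw [hr, List.drop_append, List.drop_drop, hdl, show n - (l.length - pos) = 0 from by omega,
          List.drop_zero]
    have hBdrop : (ys ++ r.drop n).drop k = l.take pos := by
      rw [List.drop_append, hyslen, List.drop_of_length_le (by omega), hb, List.drop_append,
          List.drop_of_length_le (by simp; omega), List.length_drop,
          show k - n - (l.length - (pos + n)) = 0 from by omega, List.drop_zero, List.nil_append,
          List.nil_append]
    have hBtake : (ys ++ r.drop n).take k = ys ++ l.drop (pos + n) := by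
      rw [List.take_append, hyslen, List.take_of_length_le (by omega), hb, List.take_append,
          List.take_of_length_le (by simp; omega), List.length_drop,
          show k - n - (l.length - (pos + n)) = 0 from by omega, List.take_zero, List.append_nil]
    rw [iF_contig _ 0 pos l (by rw [hyslen]; omega), hBdrop, hBtake, hyslen]
    simp [show 0 + pos = pos from by omega]
  -- wrapping case: split the reversed segment at the end of the list
  · have hys : ys = ys.take k ++ ys.drop k := (List.take_append_drop k ys).symm
    have hb : r.drop n = (l.take pos).drop (n - k) := by
      rw [hr, List.drop_append, List.drop_of_length_le (by omega), List.nil_append, hdl]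
    have hlenA : (ys.take k).length = k := by simp [hyslen]; omega
    have hlenB : (ys.drop k).length = n - k := by simp [hyslen]
    conv_lhs => rw [hys]
    rw [iF_append, iF_contig _ 0 pos l (by rw [hlenA]; omega)]
    rw [List.drop_of_length_le (by rw [hlenA]; omega : l.length ≤ 0 + pos + (List.take k ys).length),
        List.append_nil]
    rw [iF_wrap _ _ pos _ (by simp [hlenA]; omega) (by simp [hlenA, hlenB]; omega)]
    have hRd : List.drop k (ys ++ List.drop n r) = List.drop k ys ++ List.drop n r := by
      rw [List.drop_append, hyslen, show k - n = 0 from by omega, List.drop_zero]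
    have hRt : List.take k (ys ++ List.drop n r) = List.take k ys := by
      rw [List.take_append, hyslen, show k - n = 0 from by omega, List.take_zero, List.append_nil]
    rw [hRd, hRt, hb]
    have e1 : 0 + (List.take k ys).length + pos - (List.take (0 + pos) l ++ List.take k ys).length = 0 := by
      simp [hlenA, htl]; omega
    rw [e1, List.take_zero, List.nil_append, Nat.zero_add, hlenB]
    have hLd : List.drop (n - k) (List.take (0 + pos) l ++ List.take k ys)
        = List.drop (n - k) (List.take pos l) ++ List.take k ys := by
      rw [Nat.zero_add, List.drop_append, htl, show n - k - pos = 0 from by omega, List.drop_zero]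
    rw [hLd]
    simp [List.append_assoc]

theorem length_reverseWrap (l : List Nat) (pos n : Nat) (hn : n ≤ l.length) :
    (reverseWrap l pos n).length = l.length := by
  simp [reverseWrap]; omega

theorem mem_reverseWrap (l : List Nat) (pos n : Nat) (v : Nat) (h : v ∈ reverseWrap l pos n) :
    v ∈ l := by
  have sub : ∀ x, x ∈ (List.take n (l.drop pos ++ l.take pos)).reverse ++ List.drop n (l.drop pos ++ l.take pos) → x ∈ l := by
    intro x hx
    rcases List.mem_append.1 hx with hx | hx
    · rw [List.mem_reverse] at hx
      rcases List.mem_append.1 (List.mem_of_mem_take hx) with h3 | h3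
      exacts [List.mem_of_mem_drop h3, List.mem_of_mem_take h3]
    · rcases List.mem_append.1 (List.mem_of_mem_drop hx) with h3 | h3
      exacts [List.mem_of_mem_drop h3, List.mem_of_mem_take h3]
  simp only [reverseWrap] at h
  rcases List.mem_append.1 h with h | h
  exacts [sub v (List.mem_of_mem_drop h), sub v (List.mem_of_mem_take h)]

theorem knot_round_eq (L : List Nat) : ∀ (pos skip : Nat) (l : List Nat),
    l.length = 256 → pos < 256 → (∀ n ∈ L, n ≤ 256) →
    oneRoundGo L pos skip l = fwdRoundGo L pos skip l ∧
    (fwdRoundGo L pos skip l).1.length = 256 ∧ (fwdRoundGo L pos skip l).2.1 < 256 ∧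
    (∀ v ∈ (fwdRoundGo L pos skip l).1, v ∈ l) := by
  induction L with
  | nil =>
    intro pos skip l hl hp _
    exact ⟨rfl, hl, hp, fun v hv => hv⟩
  | cons n rest ih =>
    intro pos skip l hl hp hL
    have hn : n ≤ 256 := hL n (by simp)
    have hstep : insertFrom pos (selectReverse pos n l) l = reverseWrap l pos n :=
      step_eq l pos n (by omega) (by omega)
    have hlen : (reverseWrap l pos n).length = 256 := by rw [length_reverseWrap l pos n (by omega)]; exact hl
    have hposeq : (if (reverseWrap l pos n).length ≤ pos + n + skip then (pos + n + skip) % (reverseWrap l pos n).length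
        else pos + n + skip) = (pos + n + skip) % 256 := by
      rw [hlen]; split
      · rfl
      · exact (Nat.mod_eq_of_lt (by omega)).symm
    have hskipeq : (if (reverseWrap l pos n).length ≤ skip + 1 then (skip + 1) % (reverseWrap l pos n).length
        else skip + 1) = (skip + 1) % 256 := by
      rw [hlen]; split
      · rfl
      · exact (Nat.mod_eq_of_lt (by omega)).symm
    have hA : oneRoundGo (n :: rest) pos skip l
        = oneRoundGo rest ((pos + n + skip) % 256) ((skip + 1) % 256) (reverseWrap l pos n) := by
      simp only [oneRoundGo, hstep, hposeq, hskipeq]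
    have hB : fwdRoundGo (n :: rest) pos skip l
        = fwdRoundGo rest ((pos + n + skip) % 256) ((skip + 1) % 256) (reverseWrap l pos n) := rfl
    obtain ⟨e, l2, p2, m2⟩ := ih ((pos + n + skip) % 256) ((skip + 1) % 256) (reverseWrap l pos n)
      hlen (Nat.mod_lt _ (by omega)) (fun m hm => hL m (by simp [hm]))
    refine ⟨by rw [hA, hB, e], by rw [hB]; exact l2, by rw [hB]; exact p2, ?_⟩
    rw [hB]
    exact fun v hv => mem_reverseWrap l pos n v (m2 v hv)

theorem iter_eq (L : List Nat) (hL : ∀ n ∈ L, n ≤ 256) : ∀ (k : Nat) (st : List Nat × Nat × Nat),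
    st.1.length = 256 → st.2.1 < 256 →
    roundsA L k st = fwdIter L k st ∧ (fwdIter L k st).1.length = 256 ∧
    (fwdIter L k st).2.1 < 256 ∧ (∀ v ∈ (fwdIter L k st).1, v ∈ st.1) := by
  intro k
  induction k with
  | zero => intro st h1 h2; exact ⟨rfl, h1, h2, fun v hv => hv⟩
  | succ k ih =>
    intro st h1 h2
    obtain ⟨e, l2, p2, m2⟩ := knot_round_eq L st.2.1 st.2.2 st.1 h1 h2 hL
    obtain ⟨e', l2', p2', m2'⟩ := ih (fwdRoundGo L st.2.1 st.2.2 st.1) l2 p2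
    refine ⟨?_, l2', p2', fun v hv => m2 v (m2' v hv)⟩
    show roundsA L k (oneRoundGo L st.2.1 st.2.2 st.1) = fwdIter L k (fwdRoundGo L st.2.1 st.2.2 st.1)
    rw [e, e']

-- ===== bridging the forward circular reversals to B's rotated frame =====

theorem twistsInner_acc : ∀ (L : List Nat) (skip : Nat) (out : List (Nat × Nat)),
    twistsInner L skip out = (out ++ (twistsInner L skip []).1, (twistsInner L skip []).2) := by
  intro L
  induction L with
  | nil => intro skip out; simp [twistsInner]
  | cons n rest ih =>
    intro skip out
    show twistsInner rest ((skip+1)%256) (out ++ [(n,(n+skip)%256)]) = _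
    rw [ih ((skip+1)%256) (out ++ [(n,(n+skip)%256)])]
    conv_rhs => rw [show twistsInner (n::rest) skip [] = twistsInner rest ((skip+1)%256) [(n,(n+skip)%256)] from rfl,
      ih ((skip+1)%256) [(n,(n+skip)%256)]]
    simp

theorem twistsRounds_acc (L : List Nat) : ∀ (k skip : Nat) (out : List (Nat × Nat)),
    twistsRounds L k skip out = out ++ twistsRounds L k skip [] := by
  intro k
  induction k with
  | zero => intro skip out; simp [twistsRounds]
  | succ k ih =>
    intro skip out
    show twistsRounds L k (twistsInner L skip out).2 (twistsInner L skip out).1 = _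
    rw [twistsInner_acc L skip out]
    rw [ih (twistsInner L skip []).2 (out ++ (twistsInner L skip []).1)]
    conv_rhs => rw [show twistsRounds L (k+1) skip []
        = twistsRounds L k (twistsInner L skip []).2 (twistsInner L skip []).1 from rfl,
      ih (twistsInner L skip []).2 (twistsInner L skip []).1]
    simp

theorem sparseGo_append : ∀ (t1 t2 : List (Nat × Nat)) (l : List Nat) (off : Nat),
    sparseGo (t1 ++ t2) l off = sparseGo t2 (sparseGo t1 l off).1 (sparseGo t1 l off).2 := by
  intro t1
  induction t1 with
  | nil => intro t2 l off; rfl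
  | cons p rest ih =>
    intro t2 l off
    obtain ⟨n, shift⟩ := p
    simp only [List.cons_append, sparseGo]
    exact ih t2 _ _

theorem frame_step (l : List Nat) (pos skip n : Nat) (hl : l.length = 256) (hp : pos < 256) :
    (((l.rotate pos).take n).reverse ++ (l.rotate pos).drop n).drop ((n + skip) % 256)
      ++ (((l.rotate pos).take n).reverse ++ (l.rotate pos).drop n).take ((n + skip) % 256)
    = (reverseWrap l pos n).rotate ((pos + n + skip) % 256) := by
  have hf : l.rotate pos = l.drop pos ++ l.take pos :=
    List.rotate_eq_drop_append_take (by omega)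
  rw [hf]
  set r2 := ((l.drop pos ++ l.take pos).take n).reverse ++ (l.drop pos ++ l.take pos).drop n with hr2
  have hlen : r2.length = 256 := by simp [hr2]; omega
  have h1 : r2.drop ((n + skip) % 256) ++ r2.take ((n + skip) % 256) = r2.rotate ((n + skip) % 256) :=
    (List.rotate_eq_drop_append_take (by rw [hlen]; exact le_of_lt (Nat.mod_lt _ (by omega)))).symm
  have hW : reverseWrap l pos n = r2.rotate (l.length - pos) := by
    rw [reverseWrap_def, ← hr2]
    exact (List.rotate_eq_drop_append_take (by rw [hlen, hl]; omega)).symm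
  rw [h1, hW, List.rotate_rotate]
  rw [← List.rotate_mod r2 ((n + skip) % 256), ← List.rotate_mod r2 (l.length - pos + (pos + n + skip) % 256)]
  rw [hlen, hl]
  congr 1
  omega

theorem frame_round : ∀ (L : List Nat) (pos skip : Nat) (l : List Nat),
    l.length = 256 → pos < 256 → (∀ n ∈ L, n ≤ 256) →
    sparseGo (twistsInner L skip []).1 (l.rotate pos) pos
      = ((fwdRoundGo L pos skip l).1.rotate (fwdRoundGo L pos skip l).2.1, (fwdRoundGo L pos skip l).2.1)
    ∧ (twistsInner L skip []).2 = (fwdRoundGo L pos skip l).2.2 := by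
  intro L
  induction L with
  | nil => intro pos skip l hl hp _; exact ⟨rfl, rfl⟩
  | cons n rest ih =>
    intro pos skip l hl hp hL
    have hn : n ≤ 256 := hL n (by simp)
    have e1 : twistsInner (n::rest) skip []
        = ((n,(n+skip)%256) :: (twistsInner rest ((skip+1)%256) []).1, (twistsInner rest ((skip+1)%256) []).2) := by
      show twistsInner rest ((skip+1)%256) [(n,(n+skip)%256)] = _
      rw [twistsInner_acc rest ((skip+1)%256) [(n,(n+skip)%256)]]
      simp
    have hl' : (reverseWrap l pos n).length = 256 := by
      rw [length_reverseWrap l pos n (by omega)]; exact hl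
    have hp' : (pos + n + skip) % 256 < 256 := Nat.mod_lt _ (by omega)
    have hoff : (pos + (n + skip) % 256) % 256 = (pos + n + skip) % 256 := by omega
    obtain ⟨ihA, ihB⟩ := ih ((pos + n + skip) % 256) ((skip + 1) % 256) (reverseWrap l pos n)
      hl' hp' (fun m hm => hL m (by simp [hm]))
    constructor
    · rw [e1]
      show sparseGo (twistsInner rest ((skip+1)%256) []).1
          ((((l.rotate pos).take n).reverse ++ (l.rotate pos).drop n).drop ((n+skip)%256)
            ++ (((l.rotate pos).take n).reverse ++ (l.rotate pos).drop n).take ((n+skip)%256))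
          ((pos + (n + skip) % 256) % 256) = _
      rw [frame_step l pos skip n hl hp, hoff]
      exact ihA
    · rw [e1]
      exact ihB

theorem frame_rounds : ∀ (k : Nat) (L : List Nat), (∀ n ∈ L, n ≤ 256) →
    ∀ (pos skip : Nat) (l : List Nat), l.length = 256 → pos < 256 →
    sparseGo (twistsRounds L k skip []) (l.rotate pos) pos
      = ((fwdIter L k (l,pos,skip)).1.rotate (fwdIter L k (l,pos,skip)).2.1,
         (fwdIter L k (l,pos,skip)).2.1) := by
  intro k
  induction k with
  | zero => intro L _ pos skip l _ _; rfl
  | succ k ih =>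
    intro L hL pos skip l hl hp
    have hdec : twistsRounds L (k+1) skip []
        = (twistsInner L skip []).1 ++ twistsRounds L k (twistsInner L skip []).2 [] := by
      show twistsRounds L k (twistsInner L skip []).2 (twistsInner L skip []).1 = _
      exact twistsRounds_acc L k (twistsInner L skip []).2 (twistsInner L skip []).1
    obtain ⟨hR, hS⟩ := frame_round L pos skip l hl hp hL
    obtain ⟨_, l2, p2, _⟩ := knot_round_eq L pos skip l hl hp hL
    rw [hdec, sparseGo_append, hR, hS]
    have := ih L hL (fwdRoundGo L pos skip l).2.1 (fwdRoundGo L pos skip l).2.2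
      (fwdRoundGo L pos skip l).1 l2 p2
    show sparseGo _ ((fwdRoundGo L pos skip l).1.rotate (fwdRoundGo L pos skip l).2.1)
        (fwdRoundGo L pos skip l).2.1 = _
    rw [this]
    rfl

theorem sparseB_eq (L : List Nat) (hL : ∀ n ∈ L, n ≤ 256) :
    sparseB L = (fwdIter L 64 (List.range 256, 0, 0)).1 := by
  obtain ⟨_, l2, p2, _⟩ := iter_eq L hL 64 (List.range 256, 0, 0) (by simp) (by simp)
  have h := frame_rounds 64 L hL 0 0 (List.range 256) (by simp) (by simp)
  rw [List.rotate_zero] at h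
  show (let p := sparseGo (twistsRounds L 64 0 []) (List.range 256) 0;
        let r := (256 - p.2) % 256; p.1.drop r ++ p.1.take r) = _
  rw [h]
  set st := fwdIter L 64 (List.range 256, 0, 0) with hst
  show (st.1.rotate st.2.1).drop ((256 - st.2.1) % 256) ++ (st.1.rotate st.2.1).take ((256 - st.2.1) % 256) = st.1
  have hlenrot : (st.1.rotate st.2.1).length = 256 := by simp [l2]
  rw [show (st.1.rotate st.2.1).drop ((256 - st.2.1) % 256) ++ (st.1.rotate st.2.1).take ((256 - st.2.1) % 256)
      = (st.1.rotate st.2.1).rotate ((256 - st.2.1) % 256) from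
    (List.rotate_eq_drop_append_take (by rw [hlenrot]; exact le_of_lt (Nat.mod_lt _ (by omega)))).symm]
  rw [List.rotate_rotate]
  rw [← List.rotate_mod st.1 (st.2.1 + (256 - st.2.1) % 256), l2]
  rw [show (st.2.1 + (256 - st.2.1) % 256) % 256 = 0 from by omega, List.rotate_zero]

-- ===== counting =====

theorem accXor_last (rest : List Nat) : ∀ a : Nat,
    (a :: accXorGo a rest).getLastD 0 = rest.foldl (fun x v => x ^^^ v) a := by
  induction rest with
  | nil => intro a; simp [accXorGo]
  | cons x rest ih => intro a; simp [accXorGo, List.foldl_cons, ← ih (a ^^^ x)]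

theorem dense_eq (c : List Nat) (hc : c ≠ []) :
    (accumulateXor c).getLastD 0 = c.foldl (fun a v => a ^^^ v) 0 := by
  match c with
  | a :: rest =>
    have h : accumulateXor (a :: rest) = a :: accXorGo a rest := rfl
    rw [h, accXor_last rest a, List.foldl_cons, Nat.zero_xor]

-- the DP table, evaluated once (so the per-byte decide below is over a literal list)
theorem pc_lit : popcountsB = [0,1,1,2,1,2,2,3,1,2,2,3,2,3,3,4,1,2,2,3,2,3,3,4,2,3,3,4,3,4,4,5,1,2,2,3,2,3,3,4,2,3,3,4,3,4,4,5,2,3,3,4,3,4,4,5,3,4,4,5,4,5,5,6,1,2,2,3,2,3,3,4,2,3,3,4,3,4,4,5,2,3,3,4,3,4,4,5,3,4,4,5,4,5,5,6,2,3,3,4,3,4,4,5,3,4,4,5,4,5,5,6,3,4,4,5,4,5,5,6,4,5,5,6,5,6,6,7,1,2,2,3,2,3,3,4,2,3,3,4,3,4,4,5,2,3,3,4,3,4,4,5,3,4,4,5,4,5,5,6,2,3,3,4,3,4,4,5,3,4,4,5,4,5,5,6,3,4,4,5,4,5,5,6,4,5,5,6,5,6,6,7,2,3,3,4,3,4,4,5,3,4,4,5,4,5,5,6,3,4,4,5,4,5,5,6,4,5,5,6,5,6,6,7,3,4,4,5,4,5,5,6,4,5,5,6,5,6,6,7,4,5,5,6,5,6,6,7,5,6,6,7,6,7,7,8]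 := by
  decide

set_option maxRecDepth 40000 in
theorem byte_count (b : Nat) (hb : b < 256) :
    (PySem.Chars.join [] ((format02x b).map toBinA)).count '1' = popcountsB.getD b 0 := by
  rw [pc_lit]
  exact (by decide : ∀ b < 256, (PySem.Chars.join [] ((format02x b).map toBinA)).count '1'
      = [0,1,1,2,1,2,2,3,1,2,2,3,2,3,3,4,1,2,2,3,2,3,3,4,2,3,3,4,3,4,4,5,1,2,2,3,2,3,3,4,2,3,3,4,3,4,4,5,2,3,3,4,3,4,4,5,3,4,4,5,4,5,5,6,1,2,2,3,2,3,3,4,2,3,3,4,3,4,4,5,2,3,3,4,3,4,4,5,3,4,4,5,4,5,5,6,2,3,3,4,3,4,4,5,3,4,4,5,4,5,5,6,3,4,4,5,4,5,5,6,4,5,5,6,5,6,6,7,1,2,2,3,2,3,3,4,2,3,3,4,3,4,4,5,2,3,3,4,3,4,4,5,3,4,4,5,4,5,5,6,2,3,3,4,3,4,4,5,3,4,4,5,4,5,5,6,3,4,4,5,4,5,5,6,4,5,5,6,5,6,6,7,2,3,3,4,3,4,4,5,3,4,4,5,4,5,5,6,3,4,4,5,4,5,5,6,4,5,5,6,5,6,6,7,3,4,4,5,4,5,5,6,4,5,5,6,5,6,6,7,4,5,5,6,5,6,6,7,5,6,6,7,6,7,7,8].getD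 b 0) b hb

theorem go_singleton (c : Char) : ∀ (l : List Char) (fuel acc : Nat), l.length ≤ fuel →
    PySem.Chars.count.go [c] fuel l acc = acc + l.count c := by
  intro l
  induction l with
  | nil => intro fuel acc h; cases fuel <;> simp [PySem.Chars.count.go]
  | cons hd t ih =>
    intro fuel acc h
    match fuel with
    | fuel + 1 =>
      simp only [PySem.Chars.count.go, List.isPrefixOf, List.count_cons]
      by_cases hc : c = hd
      · subst hc
        simp [ih fuel (acc + 1) (by simpa using h)]
        omega
      · simp [Ne.symm hc, beq_iff_eq, ih fuel acc (by simpa using h), hc]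

theorem count_singleton (cs : List Char) (c : Char) :
    PySem.Chars.count cs [c] = cs.count c := by
  simp [PySem.Chars.count, go_singleton c cs cs.length 0 le_rfl]

theorem join_nil_flatten : ∀ xss : List (List Char), PySem.Chars.join [] xss = xss.flatten := by
  intro xss
  induction xss with
  | nil => rfl
  | cons a t ih =>
    cases t with
    | nil => simp [PySem.Chars.join_singleton]
    | cons b t2 => rw [PySem.Chars.join_cons_cons]; simp [ih]

theorem foldl_xor_lt : ∀ (c : List Nat) (a : Nat), (∀ v ∈ c, v < 256) → a < 256 →
    c.foldl (fun x v => x ^^^ v) a < 256 := by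
  intro c
  induction c with
  | nil => intro a _ ha; simpa using ha
  | cons v t ih =>
    intro a hc ha
    rw [List.foldl_cons]
    exact ih (a ^^^ v) (fun w hw => hc w (by simp [hw]))
      (Nat.xor_lt_two_pow (n := 8) ha (hc v (by simp)))

theorem chunksGo_prop (l : List Nat) : ∀ (k x : Nat), l.length - x ≤ k →
    ∀ c ∈ chunksGo l x, (∀ v ∈ c, v ∈ l) ∧ c ≠ [] := by
  intro k
  induction k with
  | zero =>
    intro x h c hc
    rw [chunksGo] at hc
    rw [dif_neg (by omega)] at hc
    simp at hc
  | succ k ih =>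
    intro x h c hc
    rw [chunksGo] at hc
    by_cases hx : x < l.length
    · rw [dif_pos hx] at hc
      rcases List.mem_cons.1 hc with rfl | hc
      · refine ⟨fun v hv => List.mem_of_mem_drop (List.mem_of_mem_take hv), ?_⟩
        simp [List.take_eq_nil_iff, List.drop_eq_nil_iff]
        omega
      · exact ih (x + 16) (by omega) c hc
    · rw [dif_neg hx] at hc
      simp at hc

theorem bRow_sum (l : List Nat) (hl : l.length = 256) : ∀ (k x : Nat) (t : Int), 256 - x ≤ 16 * k →
    bRowCountGo l x t = t + ((chunksGo l x).map (fun c =>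
      ((popcountsB.getD (c.foldl (fun a v => a ^^^ v) 0) 0 : Nat) : Int))).sum := by
  intro k
  induction k with
  | zero =>
    intro x t h
    rw [bRowCountGo, dif_neg (by omega), chunksGo, dif_neg (by omega)]
    simp
  | succ k ih =>
    intro x t h
    by_cases hx : x < 256
    · rw [bRowCountGo, dif_pos hx, chunksGo, dif_pos (by omega)]
      rw [ih (x + 16) _ (by omega)]
      simp [add_assoc]
    · rw [bRowCountGo, dif_neg hx, chunksGo, dif_neg (by omega)]
      simp

theorem countA_eq (C : List (List Nat)) (hC : ∀ c ∈ C, (∀ v ∈ c, v < 256) ∧ c ≠ []) :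
    List.count '1' (PySem.Chars.join [] ((PySem.Chars.join []
        ((C.map (fun c => (accumulateXor c).getLastD 0)).map format02x)).map toBinA))
    = ((C.map (fun c =>
        popcountsB.getD (c.foldl (fun a v => a ^^^ v) 0) 0)).sum) := by
  rw [join_nil_flatten, join_nil_flatten, List.map_flatten, List.count_flatten,
      List.map_flatten, List.sum_flatten]
  simp only [List.map_map]
  refine congrArg List.sum (List.map_congr_left (fun c hc => ?_))
  obtain ⟨hv, hne⟩ := hC c hc
  have hb : (accumulateXor c).getLastD 0 = c.foldl (fun a v => a ^^^ v) 0 := dense_eq c hne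
  have hlt : c.foldl (fun a v => a ^^^ v) 0 < 256 := foldl_xor_lt c 0 hv (by omega)
  simp only [Function.comp]
  rw [← List.count_flatten, ← join_nil_flatten, hb]
  exact byte_count _ hlt

theorem row_count_eq (l : List Nat) (hl : l.length = 256) (hv : ∀ v ∈ l, v < 256) (t : Int) :
    t + ((PySem.Chars.count (PySem.Chars.join []
        ((PySem.Chars.join [] (((chunksGo l 0).map (fun c => (accumulateXor c).getLastD 0)).map format02x)).map toBinA)) ['1'] : Nat) : Int)
      = bRowCountGo l 0 t := by
  rw [count_singleton, countA_eq (chunksGo l 0)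
      (fun c hc => ⟨fun v hvc => hv v ((chunksGo_prop l (l.length) 0 (by omega) c hc).1 v hvc),
                    (chunksGo_prop l (l.length) 0 (by omega) c hc).2⟩)]
  rw [bRow_sum l hl 16 0 t (by omega)]
  congr 1
  rw [Nat.cast_list_sum, List.map_map]
  exact congrArg List.sum (List.map_congr_left (fun c _ => by
    simp [Function.comp]))

set_option maxRecDepth 4000 in
theorem digits_small_b : ((List.range 128).all (fun n => (PySem.Int.toStr (n : Int)).toList.all (fun c => c.toNat ≤ 256))) = true := by
  decide

theorem digits_small : ∀ n ∈ List.range 128, ∀ c ∈ (PySem.Int.toStr (n : Int)).toList, c.toNat ≤ 256 := by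
  intro n hn c hc
  have h1 := List.all_eq_true.1 digits_small_b n hn
  have h2 := List.all_eq_true.1 h1 c hc
  simpa using h2

theorem part1_spec_aux (s : String) (hd : Dom_part1 s) : part1 s = part1_alt s := by
  have h : s.toList.all pvDomChar = true := by simpa [Dom_part1, pvDomStr] using hd
  unfold part1 part1_alt
  simp only [List.foldl_map]
  apply PySem.List.foldl_congr_mem
  intro t n hn
  have hn' : ∃ a ∈ List.range 128, n = (a : Int) := by simpa using hn
  obtain ⟨a, ha, rfl⟩ := hn'
  set lengths := (s ++ "-" ++ PySem.Int.toStr (a : Int)).toList.map Char.toNat ++ [17, 31, 73, 47, 23] with hlen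
  have hL : ∀ m ∈ lengths, m ≤ 256 := by
    intro m hm
    rw [hlen] at hm
    rcases List.mem_append.1 hm with hm | hm
    · obtain ⟨c, hc, rfl⟩ := List.mem_map.1 hm
      rw [String.toList_append, String.toList_append] at hc
      rcases List.mem_append.1 hc with hc | hc
      · rcases List.mem_append.1 hc with hc | hc
        · have := List.all_eq_true.1 h c hc
          simp [pvDomChar] at this
          omega
        · have : c = '-' := by simpa using hc
          subst this; decide
      · exact digits_small a ha c hc
    · fin_cases hm <;> omega
  obtain ⟨e, l2, p2, m2⟩ := iter_eq lengths hL 64 (List.range 256, 0, 0) (by simp) (by simp)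
  show t + ((PySem.Chars.count (PySem.Chars.join []
      ((knotHashA (s ++ "-" ++ PySem.Int.toStr (a : Int))).map toBinA)) ['1'] : Nat) : Int)
    = bRowCountGo (sparseB lengths) 0 t
  have hkh : knotHashA (s ++ "-" ++ PySem.Int.toStr (a : Int))
      = PySem.Chars.join [] (((chunksGo (sparseB lengths) 0).map
          (fun c => (accumulateXor c).getLastD 0)).map format02x) := by
    show PySem.Chars.join [] (List.map format02x (List.map (fun chunk => (accumulateXor chunk).getLastD 0)
      (chunksGo (roundsA lengths 64 (List.range 256, 0, 0)).1 0))) = _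
    rw [e, ← sparseB_eq lengths hL]
  rw [hkh]
  have hvals : ∀ v ∈ sparseB lengths, v < 256 := by
    rw [sparseB_eq lengths hL]
    intro v hv
    have := m2 v hv
    simp at this
    omega
  have hlenB : (sparseB lengths).length = 256 := by rw [sparseB_eq lengths hL]; exact l2
  exact row_count_eq (sparseB lengths) hlenB hvals t

-- ===== VERDICT (by name: the statement is the Claim_ definition above) =====
theorem part1_spec : Claim_equal_part1 := by
  intro s h
  unfold Spec_part1
  exact part1_spec_aux s h
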